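-- pv_equiv track=rewrite | github.com/Caarlooz84/water_quality_app | GIS simulation.py | forest_growth
-- ===== SOURCE A (Python) =====
-- def forest_growth (forest, years): # def is function definition.
--     for year in range( 1, years + 1): # numbers from 1 to years (inclusive)
--         for i in range (len(forest)): #len(forest) -> counts how many items in the list forest.
--             for j in range (len(forest[i])):
--                 trees = forest[i][j] # pick the cell at row i, column j
--                 if ( i + j + year) % 2 == 0:
--                     trees += 3
--                 else:
--                     trees -= 2
--                 forest[i][j] = trees
--     return forest
-- ===== SOURCE B (Python) =====
-- def forest_growth(forest, years):
--     # Closed form: over years 1..Y, cell (i,j) gains +3 when (i+j+year) is even,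
--     # -2 otherwise.  Count of matching years depends only on the parity of i+j.
--     ye = years if years > 0 else 0
--     even_c = ye // 2          # years in 1..ye that are even
--     odd_c = ye - even_c       # years in 1..ye that are odd
--     return [[t + 5 * (even_c if (i + j) % 2 == 0 else odd_c) - 2 * ye
--              for j, t in enumerate(row)]
--             for i, row in enumerate(forest)]
-- ===== Notes on version B (the rewrite author's own statement) =====
-- stated objective: faster
-- what changed: Replaces the triple loop over years x rows x cols by a single pass over the grid with a closed-form count of matching-parity years per cell.
import Mathlib
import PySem

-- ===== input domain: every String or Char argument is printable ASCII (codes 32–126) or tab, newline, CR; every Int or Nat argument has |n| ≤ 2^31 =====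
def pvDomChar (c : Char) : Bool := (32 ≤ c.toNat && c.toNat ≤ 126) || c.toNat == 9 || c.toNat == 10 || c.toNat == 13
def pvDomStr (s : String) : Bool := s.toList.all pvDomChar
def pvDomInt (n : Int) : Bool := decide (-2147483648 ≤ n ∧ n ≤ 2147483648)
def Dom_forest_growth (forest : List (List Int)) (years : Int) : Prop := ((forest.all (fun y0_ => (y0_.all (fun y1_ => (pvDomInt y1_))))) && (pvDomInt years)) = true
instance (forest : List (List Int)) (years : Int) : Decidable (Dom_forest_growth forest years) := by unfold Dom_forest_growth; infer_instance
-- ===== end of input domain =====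

-- B replaces A's triple loop (years x rows x cols) by one pass over the grid with a
-- closed-form count of matching-parity years per cell (faster, asymptotic).
-- A mutates `forest` in place and returns it; the equivalence proved here is about
-- the RETURN value only (B builds a fresh list).


-- ===== PORT A =====
-- 'for k in range(n): xs[k] = f(k, xs[k])' — one in-place indexed update step
def pvStepSet {α : Type} (f : Nat → α → α) (r : List α) (j : Nat) : List α :=
  match r[j]? with
  | none => r
  | some x => r.set j (f j x)

def forest_growth (forest : List (List Int)) (years : Int) : List (List Int) :=
  (PySem.List.pyRange 1 (years + 1) 1).foldl (fun g year =>
    (List.range g.length).foldl (pvStepSet (fun i row =>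
      (List.range row.length).foldl (pvStepSet (fun j trees =>
        if PySem.Int.mod ((i : Int) + (j : Int) + year) 2 = 0 then trees + 3
        else trees - 2)) row)) g) forest

-- ===== PORT B =====
def forest_growth_alt (forest : List (List Int)) (years : Int) : List (List Int) :=
  let ye : Int := if years > 0 then years else 0
  let even_c : Int := PySem.Int.floordiv ye 2
  let odd_c : Int := ye - even_c
  forest.mapIdx (fun i row => row.mapIdx (fun j t =>
    t + 5 * (if PySem.Int.mod ((i : Int) + (j : Int)) 2 = 0 then even_c else odd_c) - 2 * ye))

-- ===== PRECONDITION & SPEC =====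
def Spec_forest_growth (forest : List (List Int)) (years : Int) (out : List (List Int)) : Prop := out = forest_growth_alt forest years
instance (forest : List (List Int)) (years : Int) (out : List (List Int)) : Decidable (Spec_forest_growth forest years out) := by unfold Spec_forest_growth; infer_instance

-- ===== CLAIM (what is proved, stated in full; the proofs are below) =====
def Claim_equal_forest_growth : Prop := ∀ (forest : List (List Int)) (years : Int), Dom_forest_growth forest years → Spec_forest_growth forest years (forest_growth forest years)

-- ===== LEMMAS AND PROOFS =====

-- the +3/-2 per-year increment of cell (i,j)
def pvDelta (year : Int) (i j : Nat) : Int :=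
  if PySem.Int.mod ((i : Int) + (j : Int) + year) 2 = 0 then 3 else -2

-- total increment of cell (i,j) over a list of years
def pvSum : List Int → Nat → Nat → Int
  | [], _, _ => 0
  | y :: ys, i, j => pvDelta y i j + pvSum ys i j

-- add δ i j to every cell
def pvAdd (g : List (List Int)) (δ : Nat → Nat → Int) : List (List Int) :=
  g.mapIdx (fun i row => row.mapIdx (fun j t => t + δ i j))

theorem pv_foldl_stepSet_map_succ {α : Type} (f : Nat → α → α) (y : α) :
    ∀ (js : List Nat) (l : List α),
    (js.map (· + 1)).foldl (pvStepSet f) (y :: l)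
      = y :: js.foldl (pvStepSet (fun j => f (j + 1))) l := by
  intro js
  induction js with
  | nil => intro l; rfl
  | cons j js ih =>
    intro l
    simp only [List.map_cons, List.foldl_cons]
    have h : pvStepSet f (y :: l) (j + 1) = y :: pvStepSet (fun j => f (j + 1)) l j := by
      unfold pvStepSet
      cases h' : l[j]? with
      | none => simp [h']
      | some x => simp [h']
    rw [h, ih]

theorem pv_foldl_range_stepSet {α : Type} :
    ∀ (l : List α) (f : Nat → α → α),
    (List.range l.length).foldl (pvStepSet f) l = l.mapIdx f := by
  intro l
  induction l with
  | nil => intro f; rfl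
  | cons x l ih =>
    intro f
    rw [List.length_cons, List.range_succ_eq_map, List.foldl_cons]
    have h0 : pvStepSet f (x :: l) 0 = f 0 x :: l := by simp [pvStepSet]
    rw [h0, pv_foldl_stepSet_map_succ, ih, List.mapIdx_cons]

theorem pv_mapIdx_congr {α β : Type} (l : List α) (f g : Nat → α → β)
    (h : ∀ j x, f j x = g j x) : l.mapIdx f = l.mapIdx g := by
  apply List.ext_getElem
  · simp
  · intro i h1 h2
    simp only [List.getElem_mapIdx, h]

theorem pv_step_year_eq (g : List (List Int)) (year : Int) :
    (List.range g.length).foldl (pvStepSet (fun i row =>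
      (List.range row.length).foldl (pvStepSet (fun j trees =>
        if PySem.Int.mod ((i : Int) + (j : Int) + year) 2 = 0 then trees + 3
        else trees - 2)) row)) g
    = pvAdd g (fun i j => pvDelta year i j) := by
  rw [pv_foldl_range_stepSet]
  unfold pvAdd
  apply pv_mapIdx_congr
  intro i row
  rw [pv_foldl_range_stepSet]
  apply pv_mapIdx_congr
  intro j t
  unfold pvDelta
  beta_reduce
  by_cases hc : PySem.Int.mod ((i : Int) + (j : Int) + year) 2 = 0
  · rw [if_pos hc, if_pos hc]
  · rw [if_neg hc, if_neg hc]; ring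

theorem pv_add_add (g : List (List Int)) (h1 h2 : Nat → Nat → Int) :
    pvAdd (pvAdd g h1) h2 = pvAdd g (fun i j => h1 i j + h2 i j) := by
  unfold pvAdd
  apply List.ext_getElem
  · simp
  · intro i hi1 hi2
    simp only [List.getElem_mapIdx]
    apply List.ext_getElem
    · simp
    · intro j hj1 hj2
      simp only [List.getElem_mapIdx]
      ring

theorem pv_fold_years (ys : List Int) :
    ∀ (g : List (List Int)),
    ys.foldl (fun g year =>
      (List.range g.length).foldl (pvStepSet (fun i row =>
        (List.range row.length).foldl (pvStepSet (fun j trees =>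
          if PySem.Int.mod ((i : Int) + (j : Int) + year) 2 = 0 then trees + 3
          else trees - 2)) row)) g) g
    = pvAdd g (pvSum ys) := by
  induction ys with
  | nil =>
    intro g
    unfold pvAdd
    symm
    apply List.ext_getElem
    · simp
    · intro i hi1 hi2
      simp only [List.getElem_mapIdx]
      apply List.ext_getElem
      · simp
      · intro j hj1 hj2
        simp [List.getElem_mapIdx, pvSum]
  | cons y ys ih =>
    intro g
    rw [List.foldl_cons, pv_step_year_eq, ih, pv_add_add]
    have : (fun i j => pvDelta y i j + pvSum ys i j) = pvSum (y :: ys) := by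
      funext i j; simp [pvSum]
    rw [this]

theorem pv_sum_append (l1 l2 : List Int) (i j : Nat) :
    pvSum (l1 ++ l2) i j = pvSum l1 i j + pvSum l2 i j := by
  induction l1 with
  | nil => simp [pvSum]
  | cons y ys ih => simp [pvSum, ih]; ring

theorem pv_sum_closed (n : Nat) (i j : Nat) :
    pvSum (PySem.List.pyRange 1 ((n : Int) + 1) 1) i j
      = 5 * (if ((i : Int) + (j : Int)) % 2 = 0 then (n : Int) / 2 else ((n : Int) + 1) / 2)
        - 2 * (n : Int) := by
  induction n with
  | zero =>
    rw [PySem.List.pyRange_one_eq_nil (by norm_num)]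
    simp [pvSum]
  | succ n ih =>
    have hcast : ((n + 1 : Nat) : Int) + 1 = ((n : Int) + 1) + 1 := by push_cast; ring
    rw [hcast, PySem.List.pyRange_one_succ_right (by omega), pv_sum_append, ih]
    have hone : pvSum [(n : Int) + 1] i j = pvDelta ((n : Int) + 1) i j := by
      simp [pvSum]
    rw [hone]
    unfold pvDelta
    rw [PySem.Int.mod_eq_emod_of_pos (by norm_num)]
    push_cast
    split_ifs <;> omega

theorem pv_main (forest : List (List Int)) (years : Int) :
    forest_growth forest years = forest_growth_alt forest years := by
  unfold forest_growth forest_growth_alt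
  rw [pv_fold_years]
  unfold pvAdd
  by_cases h : years ≤ 0
  · rw [PySem.List.pyRange_one_eq_nil (by omega)]
    apply pv_mapIdx_congr
    intro i row
    apply pv_mapIdx_congr
    intro j t
    have hye : (if years > 0 then years else 0) = 0 := if_neg (by omega)
    have hfd : PySem.Int.floordiv 0 2 = 0 := by decide
    simp only [pvSum, hye, hfd]
    simp
  · obtain ⟨n, rfl⟩ : ∃ n : Nat, years = (n : Int) :=
      ⟨years.toNat, (Int.toNat_of_nonneg (by omega)).symm⟩
    apply pv_mapIdx_congr
    intro i row
    apply pv_mapIdx_congr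
    intro j t
    rw [pv_sum_closed]
    have hye : (if (n : Int) > 0 then (n : Int) else 0) = (n : Int) := if_pos (by omega)
    simp only [hye, PySem.Int.mod_eq_emod_of_pos (by norm_num : (0:Int) < 2),
      PySem.Int.floordiv_eq_ediv_of_pos (by norm_num : (0:Int) < 2)]
    split_ifs <;> omega

-- ===== VERDICT (by name: the statement is the Claim_ definition above) =====
theorem forest_growth_spec : Claim_equal_forest_growth := by
  intro forest years _
  unfold Spec_forest_growth
  exact pv_main forest years
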